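-- pv_equiv track=rewrite | github.com/maggiohosu/jbl-dashboard | data_engine.py | _invert_mkt_model_to_model_mkt_month
-- ===== SOURCE A (Python) =====
-- from collections import defaultdict
--
-- def _invert_mkt_model_to_model_mkt_month(mkt_model_rev):
--     """
--     {마켓: {모델: {날짜: rev}}} → {모델: {마켓: {ym: rev}}}
--     """
--     model_mkt_month = defaultdict(lambda: defaultdict(lambda: defaultdict(int)))
--     for mkt, model_dict in mkt_model_rev.items():
--         for model, day_dict in model_dict.items():
--             for ds, rev in day_dict.items():
--                 ym = str(ds)[:7]
--                 model_mkt_month[model][mkt][ym] += rev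
--     return {m: {mk: dict(ym_dict) for mk, ym_dict in v.items()} for m, v in model_mkt_month.items()}
-- ===== SOURCE B (Python) =====
-- def _invert_mkt_model_to_model_mkt_month(mkt_model_rev):
--     # one flat pass keyed by (model, mkt, ym), then reshape into the nested dict
--     flat = {}
--     for mkt, model_dict in mkt_model_rev.items():
--         for model, day_dict in model_dict.items():
--             for ds, rev in day_dict.items():
--                 key = (model, mkt, str(ds)[:7])
--                 flat[key] = flat.get(key, 0) + rev
--     out = {}
--     for (model, mkt, ym), rev in flat.items():
--         out.setdefault(model, {}).setdefault(mkt, {})[ym] = rev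
--     return out
-- ===== Notes on version B (the rewrite author's own statement) =====
-- stated objective: simpler
-- what changed: Replaces the triple-nested defaultdict accumulator and the final deep-copy comprehension by one flat dict keyed by the composite tuple (model, mkt, ym) accumulated with get(key,0)+rev, followed by a separate reshaping pass over the flat dict that builds the nested plain dicts with setdefault.
import Mathlib
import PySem

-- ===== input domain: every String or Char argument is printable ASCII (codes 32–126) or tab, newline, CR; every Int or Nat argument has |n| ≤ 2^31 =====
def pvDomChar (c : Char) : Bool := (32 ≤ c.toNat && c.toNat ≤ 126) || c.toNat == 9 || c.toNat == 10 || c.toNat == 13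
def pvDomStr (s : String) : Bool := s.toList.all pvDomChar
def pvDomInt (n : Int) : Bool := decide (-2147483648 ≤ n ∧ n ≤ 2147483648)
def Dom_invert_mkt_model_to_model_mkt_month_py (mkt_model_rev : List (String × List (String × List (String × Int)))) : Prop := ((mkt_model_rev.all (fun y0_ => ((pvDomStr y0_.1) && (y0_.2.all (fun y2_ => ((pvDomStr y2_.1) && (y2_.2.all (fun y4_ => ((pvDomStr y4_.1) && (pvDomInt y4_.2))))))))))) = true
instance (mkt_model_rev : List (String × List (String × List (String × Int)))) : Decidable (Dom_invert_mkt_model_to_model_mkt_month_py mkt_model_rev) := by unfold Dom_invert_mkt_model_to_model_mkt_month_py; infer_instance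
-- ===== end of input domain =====

-- B replaces the nested defaultdict accumulator by a flat dict keyed by (model, mkt, ym) plus a
-- separate reshaping pass (objective: simpler). Equivalence is about the RETURN value; neither mutates its argument.

-- str(ds)[:7] (ds is already a str)
def pvYm (ds : String) : String := PySem.Str.slice ds none (some 7)

-- ===== PORT A =====
def invert_mkt_model_to_model_mkt_month_py (mkt_model_rev : List (String × List (String × List (String × Int)))) : List (String × List (String × List (String × Int))) :=
  let mmm : PySem.Dict String (PySem.Dict String (PySem.Dict String Int)) :=
    mkt_model_rev.foldl (fun acc mktPair =>
      mktPair.2.foldl (fun acc modelPair =>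
        modelPair.2.foldl (fun acc dayPair =>
          let ym := pvYm dayPair.1
          let dm := acc.getD modelPair.1 PySem.Dict.empty
          let dk := dm.getD mktPair.1 PySem.Dict.empty
          acc.insert modelPair.1 (dm.insert mktPair.1 (dk.insert ym (dk.getD ym 0 + dayPair.2)))) acc) acc)
      PySem.Dict.empty
  mmm.items.map (fun mp => (mp.1, mp.2.items.map (fun kp => (kp.1, kp.2.items))))

-- ===== PORT B =====
def invert_mkt_model_to_model_mkt_month_py_alt (mkt_model_rev : List (String × List (String × List (String × Int)))) : List (String × List (String × List (String × Int))) :=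
  let flat : PySem.Dict (String × String × String) Int :=
    mkt_model_rev.foldl (fun f mktPair =>
      mktPair.2.foldl (fun f modelPair =>
        modelPair.2.foldl (fun f dayPair =>
          let key := (modelPair.1, mktPair.1, pvYm dayPair.1)
          f.insert key (f.getD key 0 + dayPair.2)) f) f)
      PySem.Dict.empty
  let out : PySem.Dict String (PySem.Dict String (PySem.Dict String Int)) :=
    flat.items.foldl (fun out kv =>
      let dm := out.getD kv.1.1 PySem.Dict.empty
      let dk := dm.getD kv.1.2.1 PySem.Dict.empty
      out.insert kv.1.1 (dm.insert kv.1.2.1 (dk.insert kv.1.2.2 kv.2))) PySem.Dict.empty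
  out.items.map (fun mp => (mp.1, mp.2.items.map (fun kp => (kp.1, kp.2.items))))

-- ===== PRECONDITION & SPEC =====
def Spec_invert_mkt_model_to_model_mkt_month_py (mkt_model_rev : List (String × List (String × List (String × Int)))) (out : List (String × List (String × List (String × Int)))) : Prop := out = invert_mkt_model_to_model_mkt_month_py_alt mkt_model_rev
instance (mkt_model_rev : List (String × List (String × List (String × Int)))) (out : List (String × List (String × List (String × Int)))) : Decidable (Spec_invert_mkt_model_to_model_mkt_month_py mkt_model_rev out) := by unfold Spec_invert_mkt_model_to_model_mkt_month_py; infer_instance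

-- ===== CLAIM (what is proved, stated in full; the proofs are below) =====
def Claim_equal_invert_mkt_model_to_model_mkt_month_py : Prop := ∀ (mkt_model_rev : List (String × List (String × List (String × Int)))), Dom_invert_mkt_model_to_model_mkt_month_py mkt_model_rev → Spec_invert_mkt_model_to_model_mkt_month_py mkt_model_rev (invert_mkt_model_to_model_mkt_month_py mkt_model_rev)

-- ===== LEMMAS AND PROOFS =====

-- abbreviations for the two accumulator shapes
abbrev pvTrip : Type := String × String × String
abbrev pvNDict : Type := PySem.Dict String (PySem.Dict String (PySem.Dict String Int))

-- nested insert at a composite key (the shared inner shape of both loop bodies)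
def pvPut (out : pvNDict) (k : pvTrip) (v : Int) : pvNDict :=
  let dm := out.getD k.1 PySem.Dict.empty
  let dk := dm.getD k.2.1 PySem.Dict.empty
  out.insert k.1 (dm.insert k.2.1 (dk.insert k.2.2 v))

-- nested lookup with default 0
def pvLook (out : pvNDict) (k : pvTrip) : Int :=
  ((out.getD k.1 PySem.Dict.empty).getD k.2.1 PySem.Dict.empty).getD k.2.2 0

def pvNStep (out : pvNDict) (t : pvTrip × Int) : pvNDict := pvPut out t.1 (pvLook out t.1 + t.2)
def pvFStep (f : PySem.Dict pvTrip Int) (t : pvTrip × Int) : PySem.Dict pvTrip Int :=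
  f.insert t.1 (f.getD t.1 0 + t.2)
def pvRStep (out : pvNDict) (t : pvTrip × Int) : pvNDict := pvPut out t.1 t.2
def pvReshape (f : PySem.Dict pvTrip Int) : pvNDict := f.items.foldl pvRStep PySem.Dict.empty

-- the stream of (key, rev) updates both loops perform, in order
def pvTrips (mkt_model_rev : List (String × List (String × List (String × Int)))) : List (pvTrip × Int) :=
  mkt_model_rev.flatMap (fun p => p.2.flatMap (fun q => q.2.map (fun r => ((q.1, p.1, pvYm r.1), r.2))))

theorem pv_foldl_flatMap {α β γ : Type} (l : List α) (f : α → List β) (g : γ → β → γ) (init : γ) :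
    (l.flatMap f).foldl g init = l.foldl (fun acc a => (f a).foldl g acc) init := by
  induction l generalizing init with
  | nil => rfl
  | cons a l ih => simp [List.foldl_append, ih]

def pvFinal (mmm : pvNDict) : List (String × List (String × List (String × Int))) :=
  mmm.items.map (fun mp => (mp.1, mp.2.items.map (fun kp => (kp.1, kp.2.items))))

theorem pvA_inner (mkt model : String) (days : List (String × Int)) (acc : pvNDict) :
    days.foldl (fun acc dayPair =>
      let ym := pvYm dayPair.1
      let dm := acc.getD model PySem.Dict.empty
      let dk := dm.getD mkt PySem.Dict.empty
      acc.insert model (dm.insert mkt (dk.insert ym (dk.getD ym 0 + dayPair.2)))) acc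
    = (days.map (fun r => ((model, mkt, pvYm r.1), r.2))).foldl pvNStep acc := by
  rw [List.foldl_map]
  rfl

theorem pvA_mid (mkt : String) (models : List (String × List (String × Int))) (acc : pvNDict) :
    models.foldl (fun acc modelPair =>
      modelPair.2.foldl (fun acc dayPair =>
        let ym := pvYm dayPair.1
        let dm := acc.getD modelPair.1 PySem.Dict.empty
        let dk := dm.getD mkt PySem.Dict.empty
        acc.insert modelPair.1 (dm.insert mkt (dk.insert ym (dk.getD ym 0 + dayPair.2)))) acc) acc
    = (models.flatMap (fun q => q.2.map (fun r => ((q.1, mkt, pvYm r.1), r.2)))).foldl pvNStep acc := by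
  rw [pv_foldl_flatMap]
  congr 1
  funext a q
  exact pvA_inner mkt q.1 q.2 a

theorem pvA_outer (x : List (String × List (String × List (String × Int)))) (acc : pvNDict) :
    x.foldl (fun acc mktPair =>
      mktPair.2.foldl (fun acc modelPair =>
        modelPair.2.foldl (fun acc dayPair =>
          let ym := pvYm dayPair.1
          let dm := acc.getD modelPair.1 PySem.Dict.empty
          let dk := dm.getD mktPair.1 PySem.Dict.empty
          acc.insert modelPair.1 (dm.insert mktPair.1 (dk.insert ym (dk.getD ym 0 + dayPair.2)))) acc) acc) acc
    = (pvTrips x).foldl pvNStep acc := by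
  unfold pvTrips
  rw [pv_foldl_flatMap]
  congr 1
  funext a p
  exact pvA_mid p.1 p.2 a

theorem pvA_canon (x : List (String × List (String × List (String × Int)))) :
    invert_mkt_model_to_model_mkt_month_py x = pvFinal ((pvTrips x).foldl pvNStep PySem.Dict.empty) := by
  unfold invert_mkt_model_to_model_mkt_month_py
  exact congrArg pvFinal (pvA_outer x PySem.Dict.empty)

theorem pvB_inner (mkt model : String) (days : List (String × Int)) (f : PySem.Dict pvTrip Int) :
    days.foldl (fun f dayPair =>
      let key : pvTrip := (model, mkt, pvYm dayPair.1)
      f.insert key (f.getD key 0 + dayPair.2)) f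
    = (days.map (fun r => ((model, mkt, pvYm r.1), r.2))).foldl pvFStep f := by
  rw [List.foldl_map]
  rfl

theorem pvB_mid (mkt : String) (models : List (String × List (String × Int))) (f : PySem.Dict pvTrip Int) :
    models.foldl (fun f modelPair =>
      modelPair.2.foldl (fun f dayPair =>
        let key : pvTrip := (modelPair.1, mkt, pvYm dayPair.1)
        f.insert key (f.getD key 0 + dayPair.2)) f) f
    = (models.flatMap (fun q => q.2.map (fun r => ((q.1, mkt, pvYm r.1), r.2)))).foldl pvFStep f := by
  rw [pv_foldl_flatMap]
  congr 1
  funext a q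
  exact pvB_inner mkt q.1 q.2 a

theorem pvB_outer (x : List (String × List (String × List (String × Int)))) (f : PySem.Dict pvTrip Int) :
    x.foldl (fun f mktPair =>
      mktPair.2.foldl (fun f modelPair =>
        modelPair.2.foldl (fun f dayPair =>
          let key : pvTrip := (modelPair.1, mktPair.1, pvYm dayPair.1)
          f.insert key (f.getD key 0 + dayPair.2)) f) f) f
    = (pvTrips x).foldl pvFStep f := by
  unfold pvTrips
  rw [pv_foldl_flatMap]
  congr 1
  funext a p
  exact pvB_mid p.1 p.2 a

theorem pvB_canon (x : List (String × List (String × List (String × Int)))) :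
    invert_mkt_model_to_model_mkt_month_py_alt x = pvFinal (pvReshape ((pvTrips x).foldl pvFStep PySem.Dict.empty)) := by
  unfold invert_mkt_model_to_model_mkt_month_py_alt
  rw [pvB_outer x PySem.Dict.empty]
  rfl

-- inserts at two distinct keys commute when the first key is already present
theorem pv_insert_comm_of_contains {κ ν : Type} [BEq κ] [LawfulBEq κ]
    (d : PySem.Dict κ ν) (k k' : κ) (v w : ν) (hk : d.contains k = true) (hne : k ≠ k') :
    (d.insert k v).insert k' w = (d.insert k' w).insert k v := by
  have hne1 : (k' == k) = false := by
    simp only [beq_eq_false_iff_ne, ne_eq]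
    exact fun h => hne h.symm
  have hne2 : (k == k') = false := by
    simp only [beq_eq_false_iff_ne, ne_eq]
    exact hne
  apply PySem.Dict.ext
  by_cases hk' : d.contains k' = true
  · rw [PySem.Dict.items_insert_of_contains (d.insert k v) w
          (by simp [PySem.Dict.contains_insert, hk']),
        PySem.Dict.items_insert_of_contains d v hk,
        PySem.Dict.items_insert_of_contains (d.insert k' w) v
          (by simp [PySem.Dict.contains_insert, hk]),
        PySem.Dict.items_insert_of_contains d w hk',
        List.map_map, List.map_map]
    apply List.map_congr_left
    intro p _
    by_cases h1 : (p.1 == k) = true <;> by_cases h2 : (p.1 == k') = true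
    · exact absurd (by rw [← eq_of_beq h1, ← eq_of_beq h2]) hne
    · simp [Function.comp, h1, h2, hne1, hne2]
    · simp [Function.comp, h1, h2, hne1, hne2]
    · simp [Function.comp, h1, h2]
  · have hk'2 : d.contains k' = false := by simpa using hk'
    rw [PySem.Dict.items_insert_of_not_contains (d.insert k v) w
          (by simp [PySem.Dict.contains_insert, hk'2, hne1]),
        PySem.Dict.items_insert_of_contains d v hk,
        PySem.Dict.items_insert_of_contains (d.insert k' w) v
          (by simp [PySem.Dict.contains_insert, hk]),
        PySem.Dict.items_insert_of_not_contains d w hk'2,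
        List.map_append]
    simp [hne1]

theorem pvPut_put_self (out : pvNDict) (k : pvTrip) (v v' : Int) :
    pvPut (pvPut out k v') k v = pvPut out k v := by
  simp [pvPut, PySem.Dict.getD_insert_self, PySem.Dict.insert_insert_self]

def pvSlot (out : pvNDict) (k : pvTrip) : Prop :=
  out.contains k.1 = true ∧
  (out.getD k.1 PySem.Dict.empty).contains k.2.1 = true ∧
  ((out.getD k.1 PySem.Dict.empty).getD k.2.1 PySem.Dict.empty).contains k.2.2 = true

theorem pvSlot_put_self (out : pvNDict) (k : pvTrip) (v : Int) : pvSlot (pvPut out k v) k := by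
  refine ⟨?_, ?_, ?_⟩ <;>
    simp [pvSlot, pvPut, PySem.Dict.getD_insert_self, PySem.Dict.contains_insert]

theorem pvSlot_put (out : pvNDict) (k : pvTrip) (t : pvTrip) (w : Int) (h : pvSlot out k) :
    pvSlot (pvPut out t w) k := by
  obtain ⟨h1, h2, h3⟩ := h
  obtain ⟨m, mk, ym⟩ := k
  obtain ⟨m2, mk2, ym2⟩ := t
  simp only [pvSlot, pvPut] at *
  refine ⟨by simp [PySem.Dict.contains_insert, h1], ?_, ?_⟩
  · simp only [PySem.Dict.getD_insert]
    split_ifs with hm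
    · subst hm
      simp [PySem.Dict.contains_insert, h2]
    · exact h2
  · simp only [PySem.Dict.getD_insert]
    split_ifs with hm
    · subst hm
      simp only [PySem.Dict.getD_insert]
      split_ifs with hmk
      · subst hmk
        simp [PySem.Dict.contains_insert, h3]
      · exact h3
    · exact h3

theorem pvPut_comm (out : pvNDict) (k t : pvTrip) (v w : Int) (hs : pvSlot out k) (hne : t ≠ k) :
    pvPut (pvPut out k v) t w = pvPut (pvPut out t w) k v := by
  obtain ⟨m, mk, ym⟩ := k
  obtain ⟨m2, mk2, ym2⟩ := t
  obtain ⟨h1, h2, h3⟩ := hs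
  by_cases hm : m2 = m
  · subst hm
    by_cases hmk : mk2 = mk
    · subst hmk
      have hym : ym2 ≠ ym := fun h => hne (by rw [h])
      simp only [pvPut, PySem.Dict.getD_insert_self, PySem.Dict.insert_insert_self]
      exact congrArg _ (congrArg _ (pv_insert_comm_of_contains _ _ _ _ _ h3 (fun h => hym h.symm)))
    · have hmk' : ¬ mk = mk2 := fun h => hmk h.symm
      simp only [pvPut, PySem.Dict.getD_insert_self, PySem.Dict.insert_insert_self,
        PySem.Dict.getD_insert, if_neg hmk, if_neg hmk']
      exact congrArg _ (pv_insert_comm_of_contains _ _ _ _ _ h2 hmk')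
  · have hm' : ¬ m = m2 := fun h => hm h.symm
    simp only [pvPut, PySem.Dict.getD_insert, if_neg hm, if_neg hm']
    exact pv_insert_comm_of_contains _ _ _ _ _ h1 hm'

theorem pvLook_put (out : pvNDict) (k j : pvTrip) (v : Int) :
    pvLook (pvPut out k v) j = if j = k then v else pvLook out j := by
  obtain ⟨m, mk, ym⟩ := k
  obtain ⟨a, b, c⟩ := j
  simp only [pvLook, pvPut, PySem.Dict.getD_insert]
  by_cases h1 : a = m <;> by_cases h2 : b = mk <;> by_cases h3 : c = ym <;>
    simp [h1, h2, h3, Prod.ext_iff, PySem.Dict.getD_insert]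

theorem pvR_not_mem (l : List (pvTrip × Int)) (k : pvTrip) :
    ∀ out : pvNDict, k ∉ l.map (·.1) → pvLook (l.foldl pvRStep out) k = pvLook out k := by
  induction l with
  | nil => intro out _; rfl
  | cons t rest ih =>
      intro out h
      simp only [List.map_cons, List.mem_cons, not_or] at h
      rw [List.foldl_cons, ih _ h.2]
      show pvLook (pvPut out t.1 t.2) k = pvLook out k
      rw [pvLook_put, if_neg h.1]

theorem pvR_mem (l : List (pvTrip × Int)) (k : pvTrip) (v : Int) :
    ∀ out : pvNDict, (k, v) ∈ l → (l.map (·.1)).Nodup → pvLook (l.foldl pvRStep out) k = v := by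
  induction l with
  | nil => intro out hm _; simp at hm
  | cons t rest ih =>
      intro out hm hnd
      simp only [List.map_cons, List.nodup_cons] at hnd
      rcases List.mem_cons.mp hm with h | h
      · have hk : t.1 = k := by rw [← h]
        have hnot : k ∉ rest.map (·.1) := hk ▸ hnd.1
        rw [List.foldl_cons, pvR_not_mem rest k _ hnot]
        show pvLook (pvPut out t.1 t.2) k = v
        rw [pvLook_put, hk, if_pos rfl, ← h]
      · rw [List.foldl_cons]
        exact ih _ h hnd.2

theorem pvLook_reshape (f : PySem.Dict pvTrip Int) (k : pvTrip) (hnd : f.keys.Nodup) :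
    pvLook (pvReshape f) k = f.getD k 0 := by
  have hnd' : (f.items.map (·.1)).Nodup := hnd
  unfold pvReshape
  cases hc : f.get? k with
  | some v =>
      rw [pvR_mem f.items k v _ (PySem.Dict.mem_items_of_get?_eq_some _ hc) hnd',
        PySem.Dict.getD_eq_get?_getD, hc]
      rfl
  | none =>
      have hk : k ∉ f.keys := (PySem.Dict.get?_eq_none_iff_not_mem_keys _ _).mp hc
      rw [pvR_not_mem f.items k _ hk, PySem.Dict.getD_eq_get?_getD, hc]
      simp [pvLook, PySem.Dict.getD_empty]

theorem pvR_put_not_mem (l : List (pvTrip × Int)) (k : pvTrip) (v : Int) :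
    ∀ out : pvNDict, pvSlot out k → k ∉ l.map (·.1) →
    l.foldl pvRStep (pvPut out k v) = pvPut (l.foldl pvRStep out) k v := by
  induction l with
  | nil => intro out _ _; rfl
  | cons t rest ih =>
      intro out hs h
      simp only [List.map_cons, List.mem_cons, not_or] at h
      rw [List.foldl_cons, List.foldl_cons]
      show rest.foldl pvRStep (pvRStep (pvPut out k v) t)
        = pvPut (rest.foldl pvRStep (pvRStep out t)) k v
      have hstep : pvRStep (pvPut out k v) t = pvPut (pvRStep out t) k v :=
        pvPut_comm out k t.1 v t.2 hs (fun hk => h.1 hk.symm)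
      rw [hstep]
      exact ih _ (pvSlot_put _ _ _ _ hs) h.2

theorem pvR_replace (l : List (pvTrip × Int)) (k : pvTrip) (v w : Int) :
    ∀ out : pvNDict, (l.map (·.1)).Nodup → (k, w) ∈ l →
    (l.map (fun p => if p.1 == k then (k, v) else p)).foldl pvRStep out
      = pvPut (l.foldl pvRStep out) k v := by
  induction l with
  | nil => intro out _ hm; simp at hm
  | cons t rest ih =>
      intro out hnd hm
      simp only [List.map_cons, List.nodup_cons] at hnd
      rcases List.mem_cons.mp hm with h | h
      · have hk : t.1 = k := by rw [← h]
        have hnot : k ∉ rest.map (·.1) := hk ▸ hnd.1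
        have hmapid : rest.map (fun p => if p.1 == k then (k, v) else p) = rest := by
          have h2 : rest.map (fun p => if p.1 == k then (k, v) else p) = rest.map id := by
            apply List.map_congr_left
            intro p hp
            have hpk : (p.1 == k) = false := by
              simp only [beq_eq_false_iff_ne, ne_eq]
              exact fun hpk => hnot (hpk ▸ List.mem_map_of_mem hp)
            simp [hpk]
          simpa using h2
        simp only [List.map_cons, hmapid, hk]
        rw [if_pos (by simp), List.foldl_cons, List.foldl_cons]
        show rest.foldl pvRStep (pvPut out k v)
          = pvPut (rest.foldl pvRStep (pvPut out t.1 t.2)) k v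
        have hs : pvSlot (pvPut out t.1 t.2) k := by
          rw [← hk]; exact pvSlot_put_self out t.1 t.2
        rw [← pvR_put_not_mem rest k v (pvPut out t.1 t.2) hs hnot]
        have hpp : pvPut (pvPut out t.1 t.2) k v = pvPut out k v := by
          rw [← hk]; exact pvPut_put_self out t.1 v t.2
        rw [hpp]
      · have hk : (t.1 == k) = false := by
          simp only [beq_eq_false_iff_ne, ne_eq]
          intro hkk
          exact hnd.1 (hkk ▸ List.mem_map_of_mem h)
        simp only [List.map_cons, hk, Bool.false_eq_true, if_false]
        rw [List.foldl_cons, List.foldl_cons]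
        exact ih _ hnd.2 h

theorem pvStep (f : PySem.Dict pvTrip Int) (t : pvTrip × Int) (hnd : f.keys.Nodup) :
    pvReshape (pvFStep f t) = pvNStep (pvReshape f) t := by
  obtain ⟨k, rev⟩ := t
  have hr : pvNStep (pvReshape f) (k, rev) = pvPut (pvReshape f) k (f.getD k 0 + rev) := by
    show pvPut (pvReshape f) k (pvLook (pvReshape f) k + rev) = _
    rw [pvLook_reshape f k hnd]
  rw [hr]
  have hnd' : (f.items.map (·.1)).Nodup := hnd
  show pvReshape (f.insert k (f.getD k 0 + rev)) = _
  unfold pvReshape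
  by_cases hc : f.contains k = true
  · rw [PySem.Dict.items_insert_of_contains _ _ hc]
    have hmemk : k ∈ f.keys := (PySem.Dict.contains_iff_mem_keys _ _).mp hc
    obtain ⟨p, hp, hpk⟩ := List.mem_map.mp hmemk
    have hmem : (k, p.2) ∈ f.items := by
      have : p = (k, p.2) := by
        rw [← hpk]
      rw [← this]
      exact hp
    exact pvR_replace f.items k _ p.2 PySem.Dict.empty hnd' hmem
  · have hc2 : f.contains k = false := by simpa using hc
    rw [PySem.Dict.items_insert_of_not_contains _ _ hc2, List.foldl_append]
    rfl

theorem pvMain (L : List (pvTrip × Int)) (f : PySem.Dict pvTrip Int) (hnd : f.keys.Nodup) :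
    pvReshape (L.foldl pvFStep f) = L.foldl pvNStep (pvReshape f) := by
  induction L generalizing f with
  | nil => rfl
  | cons t L ih =>
      simp only [List.foldl_cons]
      rw [ih _ (by exact PySem.Dict.nodup_keys_insert _ _ _ hnd), pvStep f t hnd]

-- ===== VERDICT (by name: the statement is the Claim_ definition above) =====
theorem invert_mkt_model_to_model_mkt_month_py_spec : Claim_equal_invert_mkt_model_to_model_mkt_month_py := by
  intro x _
  unfold Spec_invert_mkt_model_to_model_mkt_month_py
  rw [pvA_canon, pvB_canon]
  have h := pvMain (pvTrips x) PySem.Dict.empty (by simp [PySem.Dict.keys_empty])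
  rw [h]
  rfl
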